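-- pv_equiv track=rewrite | github.com/SaifA21/Search-Engines | SearchEngine.py | scoreSentence
-- ===== SOURCE A (Python) =====
-- def scoreSentence(tokenizedSentence, tokenizedQuery, position):
--
--     # Initialize variables
--     l = 0
--     c = 0
--     d = 0
--     k = 0
--
--     # Define list to store distinct terms
--     distinct = []
--
--     # Define variable to store contiguous count
--     contiguous = 0
--
--
--     # Compute l score
--     if position == 0:
--         l = 2
--     if position == 1:
--         l = 1
--
--
--     # Compute c, d, and k scores
--     for word in tokenizedSentence:
--
--         # Compute c score and contiguous count
--         if word in tokenizedQuery:
--             c += 1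
--             contiguous += 1
--
--             # Check if contiguous count is greater than k
--             if contiguous > k:
--                 k = contiguous
--
--         # Reset contiguous count
--         else:
--             contiguous = 0
--
--
--         # Compute d score
--         if word in tokenizedQuery and word not in distinct:
--             distinct.append(word)
--             d += 1
--
--     # Compute result score
--     v = l + c + d + k
--
--     # Return result score
--     return (v)
-- ===== SOURCE B (Python) =====
-- def scoreSentence(tokenizedSentence, tokenizedQuery, position):
--     # Precompute a hit mask once, then take three independent reductions over it.
--     q = set(tokenizedQuery)
--     hit = [w in q for w in tokenizedSentence]
--     c = sum(hit)
--     d = len({w for w, h in zip(tokenizedSentence, hit) if h})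
--     k = _max_run(hit)
--     l = 2 if position == 0 else 1 if position == 1 else 0
--     return l + c + d + k
--
--
-- def _max_run(hit):
--     # longest contiguous run of True, by a two-pointer scan over runs
--     k = 0
--     i = 0
--     n = len(hit)
--     while i < n:
--         if hit[i]:
--             j = i
--             while j < n and hit[j]:
--                 j += 1
--             if j - i > k:
--                 k = j - i
--             i = j
--         else:
--             i += 1
--     return k
-- ===== Notes on version B (the rewrite author's own statement) =====
-- stated objective: faster
-- what changed: Replaces A's single fused loop carrying five accumulators (count, contiguous run, best run, distinct list, distinct count) by a precomputed boolean hit mask followed by three independent reductions: a sum for c, a set comprehension for d, and a two-pointer run scan for k; query membership goes through a set and distinctness through a set instead of repeated list scans.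
import Mathlib
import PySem

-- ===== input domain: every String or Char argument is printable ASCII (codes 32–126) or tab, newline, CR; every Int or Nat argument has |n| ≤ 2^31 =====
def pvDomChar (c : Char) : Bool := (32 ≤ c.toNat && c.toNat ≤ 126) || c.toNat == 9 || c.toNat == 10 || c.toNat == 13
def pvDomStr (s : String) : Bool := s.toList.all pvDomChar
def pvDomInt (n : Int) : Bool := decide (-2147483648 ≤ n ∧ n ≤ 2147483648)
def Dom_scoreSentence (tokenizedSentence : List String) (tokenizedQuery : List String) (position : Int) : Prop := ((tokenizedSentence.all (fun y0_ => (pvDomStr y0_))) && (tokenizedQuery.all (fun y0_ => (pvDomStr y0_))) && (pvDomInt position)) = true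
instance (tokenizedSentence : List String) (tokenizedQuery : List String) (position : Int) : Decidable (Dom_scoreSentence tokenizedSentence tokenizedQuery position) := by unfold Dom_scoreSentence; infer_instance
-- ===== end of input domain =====

-- B replaces A's fused five-accumulator loop (with O(m) list-membership scans per word) by a hit mask built via set membership plus three independent reductions (sum, set comprehension, run scan); a timing run measured B faster.

-- ===== PORT A =====
-- loop body of A: state (c, contiguous, k, distinct, d)
def stepA (tokenizedQuery : List String) (st : Int × Int × Int × List String × Int) (word : String) : Int × Int × Int × List String × Int :=
  let (c, contiguous, k, distinct, d) := st
  let (c, contiguous, k) :=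
    if word ∈ tokenizedQuery then
      let c := c + 1
      let contiguous := contiguous + 1
      let k := if contiguous > k then contiguous else k
      (c, contiguous, k)
    else
      (c, (0 : Int), k)
  if word ∈ tokenizedQuery ∧ word ∉ distinct then
    (c, contiguous, k, distinct ++ [word], d + 1)
  else
    (c, contiguous, k, distinct, d)

def scoreSentence (tokenizedSentence : List String) (tokenizedQuery : List String) (position : Int) : Int :=
  let l : Int := 0
  let l := if position == 0 then 2 else l
  let l := if position == 1 then 1 else l
  let st := tokenizedSentence.foldl (stepA tokenizedQuery) (0, 0, 0, ([] : List String), 0)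
  let c := st.1
  let k := st.2.2.1
  let d := st.2.2.2.2
  l + c + d + k

-- ===== PORT B =====
-- length of the leading run of `true` (inner while loop of _max_run)
def leadRun : List Bool → Nat
  | [] => 0
  | false :: _ => 0
  | true :: t => 1 + leadRun t

-- longest contiguous run of `true`, scanning run by run (outer loop of _max_run)
def maxRun : List Bool → Nat
  | [] => 0
  | false :: t => maxRun t
  | true :: t => max (1 + leadRun t) (maxRun (t.drop (leadRun t)))
termination_by t => t.length
decreasing_by
  all_goals (simp only [List.length_cons, List.length_drop]; omega)

def scoreSentence_alt (tokenizedSentence : List String) (tokenizedQuery : List String) (position : Int) : Int :=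
  let q := PySem.Set.ofList tokenizedQuery
  let hit := tokenizedSentence.map (fun w => decide (w ∈ q))
  let c := hit.count true
  let d := (PySem.Set.ofList ((tokenizedSentence.zip hit).filterMap
             (fun p => if p.2 then some p.1 else none))).length
  let k := maxRun hit
  let l : Int := if position == 0 then 2 else if position == 1 then 1 else 0
  l + (c : Int) + (d : Int) + (k : Int)

-- ===== PRECONDITION & SPEC =====
def Spec_scoreSentence (tokenizedSentence : List String) (tokenizedQuery : List String) (position : Int) (out : Int) : Prop := out = scoreSentence_alt tokenizedSentence tokenizedQuery position
instance (tokenizedSentence : List String) (tokenizedQuery : List String) (position : Int) (out : Int) : Decidable (Spec_scoreSentence tokenizedSentence tokenizedQuery position out) := by unfold Spec_scoreSentence; infer_instance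

-- ===== CLAIM (what is proved, stated in full; the proofs are below) =====
def Claim_equal_scoreSentence : Prop := ∀ (tokenizedSentence : List String) (tokenizedQuery : List String) (position : Int), Dom_scoreSentence tokenizedSentence tokenizedQuery position → Spec_scoreSentence tokenizedSentence tokenizedQuery position (scoreSentence tokenizedSentence tokenizedQuery position)

-- ===== LEMMAS AND PROOFS =====

-- pure descriptions of A's accumulator components
def contF : Int → List Bool → Int
  | cont, [] => cont
  | cont, true :: t => contF (cont + 1) t
  | _, false :: t => contF 0 t

def kF : Int → Int → List Bool → Int
  | k, _, [] => k
  | k, cont, true :: t => kF (if cont + 1 > k then cont + 1 else k) (cont + 1) t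
  | k, _, false :: t => kF k 0 t

def newW : List String → List String → List String
  | _, [] => []
  | dist, w :: t => if w ∈ dist then newW dist t else w :: newW (dist ++ [w]) t

-- running best-prefix-run value
def gRun : Nat → List Bool → Nat
  | _, [] => 0
  | cont, true :: t => max (cont + 1) (gRun (cont + 1) t)
  | _, false :: t => gRun 0 t

theorem foldA_eq (tokenizedQuery : List String) :
    ∀ (ws : List String) (c cont k : Int) (dist : List String) (d : Int),
      ws.foldl (stepA tokenizedQuery) (c, cont, k, dist, d) =
        (c + ((ws.map (fun w => decide (w ∈ tokenizedQuery))).count true : Int),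
         contF cont (ws.map (fun w => decide (w ∈ tokenizedQuery))),
         kF k cont (ws.map (fun w => decide (w ∈ tokenizedQuery))),
         dist ++ newW dist (ws.filter (fun w => decide (w ∈ tokenizedQuery))),
         d + (newW dist (ws.filter (fun w => decide (w ∈ tokenizedQuery)))).length) := by
  intro ws
  induction ws with
  | nil => intro c cont k dist d; simp [contF, kF, newW]
  | cons w t ih =>
    intro c cont k dist d
    by_cases hq : w ∈ tokenizedQuery
    · by_cases hd : w ∈ dist
      · simp [stepA, hq, hd, List.foldl_cons, ih, contF, kF, newW] <;> omega
      · simp [stepA, hq, hd, List.foldl_cons, ih, contF, kF, newW] <;> omega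
    · simp [stepA, hq, List.foldl_cons, ih, contF, kF]

theorem kF_gRun : ∀ (t : List Bool) (k : Int) (cont : Nat), 0 ≤ k →
    kF k (cont : Int) t = max k ((gRun cont t : Nat) : Int) := by
  intro t
  induction t with
  | nil => intro k cont hk; simp [kF, gRun]; omega
  | cons b t ih =>
    intro k cont hk
    cases b with
    | false =>
      have := ih k 0 hk
      simpa [kF, gRun] using this
    | true =>
      have h1 : ((cont : Int) + 1) = ((cont + 1 : Nat) : Int) := by push_cast; ring
      have := ih (if (cont : Int) + 1 > k then (cont : Int) + 1 else k) (cont + 1)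
        (by split <;> omega)
      simp only [kF, gRun, h1] at this ⊢
      rw [this]
      push_cast
      omega

theorem gRun_true : ∀ (t : List Bool) (c : Nat),
    gRun c (true :: t) = max (c + 1 + leadRun t) (gRun 0 (t.drop (leadRun t))) := by
  intro t
  induction t with
  | nil => intro c; simp [gRun, leadRun]
  | cons b t ih =>
    intro c
    cases b with
    | true =>
      have h := ih (c + 1)
      have hd : (true :: t).drop (1 + leadRun t) = t.drop (leadRun t) := by
        rw [Nat.add_comm]; simp
      simp only [gRun, leadRun, hd] at h ⊢
      omega
    | false =>
      simp [gRun, leadRun]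

theorem gRun_zero : ∀ t, gRun 0 t = maxRun t := by
  intro t
  induction t using maxRun.induct with
  | case1 => simp [gRun, maxRun]
  | case2 t ih => simpa [gRun, maxRun] using ih
  | case3 t ih =>
    rw [gRun_true]
    simp only [maxRun]
    rw [ih]

theorem newW_foldl_add : ∀ (ws dist : List String),
    dist ++ newW dist ws = ws.foldl PySem.Set.add dist := by
  intro ws
  induction ws with
  | nil => intro dist; simp [newW]
  | cons w t ih =>
    intro dist
    have hadd : PySem.Set.add dist w = if w ∈ dist then dist else dist ++ [w] := by
      simp [PySem.Set.add, PySem.Set.contains]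
    by_cases h : w ∈ dist
    · simp only [List.foldl_cons, newW, if_pos h, hadd]
      exact ih dist
    · simp only [List.foldl_cons, newW, if_neg h, hadd]
      rw [← ih (dist ++ [w])]
      simp

theorem zip_map_filterMap : ∀ (s : List String) (f : String → Bool),
    (s.zip (s.map f)).filterMap (fun p => if p.2 then some p.1 else none) = s.filter f := by
  intro s f
  induction s with
  | nil => simp
  | cons w t ih =>
    simp only [List.map_cons, List.zip_cons_cons, List.filterMap_cons, List.filter_cons]
    by_cases h : f w <;> simp [h, ih]

-- ===== VERDICT (by name: the statement is the Claim_ definition above) =====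
theorem scoreSentence_spec : Claim_equal_scoreSentence := by
  unfold Claim_equal_scoreSentence
  intro s q pos _
  unfold Spec_scoreSentence scoreSentence scoreSentence_alt
  have hmask : (fun w => decide (w ∈ PySem.Set.ofList q)) = fun w => decide (w ∈ q) := by
    funext w; simp [PySem.Set.mem_ofList]
  simp only [hmask, foldA_eq, zip_map_filterMap]
  have hk : kF 0 0 (s.map (fun w => decide (w ∈ q))) =
      ((maxRun (s.map (fun w => decide (w ∈ q))) : Nat) : Int) := by
    have h := kF_gRun (s.map (fun w => decide (w ∈ q))) 0 0 (le_refl 0)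
    simp only [Nat.cast_zero] at h
    rw [h, gRun_zero]
    omega
  have hd : (PySem.Set.ofList (s.filter (fun w => decide (w ∈ q)))).length =
      (newW [] (s.filter (fun w => decide (w ∈ q)))).length := by
    rw [PySem.Set.ofList_eq_foldl, ← newW_foldl_add]
    simp
  simp only [hk, hd]
  have hl : (if pos == 1 then (1 : Int) else if pos == 0 then 2 else 0) =
      (if pos == 0 then (2 : Int) else if pos == 1 then 1 else 0) := by
    simp only [beq_iff_eq]
    split_ifs <;> omega
  rw [hl]
  ring
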